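-- pv_equiv track=rewrite | github.com/Jeremy-1509/package_chimie_Gonon | chempkg/atom.py | get_orbitales
-- ===== SOURCE A (Python) =====
-- Sous_couche = [
--     (1, 0),  # 1s
--     (2, 0),  # 2s
--     (2, 1),  # 2p
--     (3, 0),  # 3s
--     (3, 1),  # 3p
--     (4, 0),  # 4s
--     (3, 2),  # 3d
--     (4, 1),  # 4p
--     (5, 0),  # 5s
--     (4, 2),  # 4d
--     (5, 1),  # 5p
--     (6, 0),  # 6s
--     (4, 3),  # 4f
--     (5, 2),  # 5d
--     (6, 1),  # 6p
--     (7, 0),  # 7s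
--     (5, 3),  # 5f
--     (6, 2),  # 6d
--     (7, 1),  # 7p
-- ]
--
-- def num_elec(l):
--     """Renvoie le nombre maximal d'électrons pour une sous-couche de nombre quantique l.
--
--     La formule utilisée est (2*l + 1) * 2 car chaque orbitale peut contenir
--     deux électrons et il y a (2*l + 1) orbitales pour un l donné.
--     """
--     return (2 * l + 1) * 2
--
-- def get_orbitales(z):
--     """Renvoie la liste des orbitales occupées pour un atome à z électrons.
--
--     La liste retournée contient des tuples (n, l, count) décrivant combien
--     d'électrons occupent chaque sous-couche selon l'ordre défini dans
--     `Sous_couche`.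
--     """
--     atoms = z
--     orbitales_atom = []
--     i = 0
--
--     while atoms > 0 and i < len(Sous_couche):
--         n, l = Sous_couche[i]
--
--         atoms_couche = num_elec(l)
--
--         if atoms >= atoms_couche:
--             num_atom = atoms_couche
--         else:
--             num_atom = atoms
--
--         atoms -= num_atom
--
--         orbitales_atom.append((n, l, num_atom))
--
--         i += 1
--
--     return orbitales_atom
-- ===== SOURCE B (Python) =====
-- Sous_couche = [
--     (1, 0), (2, 0), (2, 1), (3, 0), (3, 1), (4, 0), (3, 2), (4, 1),
--     (5, 0), (4, 2), (5, 1), (6, 0), (4, 3), (5, 2), (6, 1), (7, 0),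
--     (5, 3), (6, 2), (7, 1),
-- ]
--
-- def num_elec(l):
--     return (2 * l + 1) * 2
--
-- def get_orbitales(z):
--     # Pass 1: capacities and prefix sums of capacities (electrons used before each subshell).
--     caps = [num_elec(l) for (_, l) in Sous_couche]
--     prefix = []
--     total = 0
--     for c in caps:
--         prefix.append(total)
--         total += c
--     # Pass 2: each occupancy is a clamp of (z - electrons before); keep only occupied shells.
--     result = []
--     for (n, l), cap, before in zip(Sous_couche, caps, prefix):
--         count = max(0, min(cap, z - before))
--         if count > 0:
--             result.append((n, l, count))
--     return result
-- ===== Notes on version B (the rewrite author's own statement) =====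
-- stated objective: alternative
-- what changed: Replaces the stop-early while loop with a decremented 'remaining' counter by two passes: a prefix-sum table of cumulative capacities, then a clamp max(0, min(cap, z - before)) per subshell with zero-count entries filtered out.
import Mathlib
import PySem

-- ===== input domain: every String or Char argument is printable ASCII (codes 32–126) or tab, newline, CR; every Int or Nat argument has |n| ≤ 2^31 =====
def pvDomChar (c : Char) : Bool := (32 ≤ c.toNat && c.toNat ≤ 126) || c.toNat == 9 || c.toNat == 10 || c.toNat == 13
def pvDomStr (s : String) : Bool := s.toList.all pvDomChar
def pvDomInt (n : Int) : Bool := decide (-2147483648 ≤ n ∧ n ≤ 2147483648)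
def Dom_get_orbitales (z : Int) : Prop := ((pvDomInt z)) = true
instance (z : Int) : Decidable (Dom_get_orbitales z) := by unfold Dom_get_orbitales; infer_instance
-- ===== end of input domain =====

-- B replaces A's stop-early decrementing loop by a prefix-sum-of-capacities table plus a
-- per-subshell clamp with a zero-count filter (alternative decomposition, same cost).

-- ===== PORT A =====
def Sous_couche : List (Int × Int) :=
  [(1,0),(2,0),(2,1),(3,0),(3,1),(4,0),(3,2),(4,1),(5,0),(4,2),(5,1),(6,0),
   (4,3),(5,2),(6,1),(7,0),(5,3),(6,2),(7,1)]

def num_elec (l : Int) : Int := (2 * l + 1) * 2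

-- the while loop: walks the table while atoms > 0, decrementing atoms
def getOrbLoop : Int → List (Int × Int) → List (Int × Int × Int)
  | _, [] => []
  | atoms, (n, l) :: rest =>
    if atoms > 0 then
      let atoms_couche := num_elec l
      let num_atom := if atoms ≥ atoms_couche then atoms_couche else atoms
      (n, l, num_atom) :: getOrbLoop (atoms - num_atom) rest
    else []

def get_orbitales (z : Int) : List (Int × Int × Int) := getOrbLoop z Sous_couche

-- ===== PORT B =====
-- prefix sums of the capacity list (the 'prefix'/'total' loop of Source B)
def pvPrefixes : List Int → Int → List Int
  | [], _ => []
  | c :: rest, total => total :: pvPrefixes rest (total + c)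

def get_orbitales_alt (z : Int) : List (Int × Int × Int) :=
  let caps := Sous_couche.map (fun p => num_elec p.2)
  let pre := pvPrefixes caps 0
  (List.zip Sous_couche (List.zip caps pre)).foldl
    (fun result x =>
      let count := max 0 (min x.2.1 (z - x.2.2))
      if count > 0 then result ++ [(x.1.1, x.1.2, count)] else result) []

-- ===== PRECONDITION & SPEC =====
def Spec_get_orbitales (z : Int) (out : List (Int × Int × Int)) : Prop := out = get_orbitales_alt z
instance (z : Int) (out : List (Int × Int × Int)) : Decidable (Spec_get_orbitales z out) := by unfold Spec_get_orbitales; infer_instance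

-- ===== CLAIM (what is proved, stated in full; the proofs are below) =====
def Claim_equal_get_orbitales : Prop := ∀ (z : Int), Dom_get_orbitales z → Spec_get_orbitales z (get_orbitales z)

-- ===== LEMMAS AND PROOFS =====

-- clean recursive form of B's second pass, carrying the remaining budget r = z - before
def pvBGo : List (Int × Int) → Int → List (Int × Int × Int)
  | [], _ => []
  | (n, l) :: rest, r =>
    let cap := num_elec l
    let c := max 0 (min cap r)
    (if 0 < c then [(n, l, c)] else []) ++ pvBGo rest (r - cap)

theorem foldl_eq_bgo (z : Int) : ∀ (xs : List (Int × Int)) (t : Int)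
    (acc : List (Int × Int × Int)),
    (List.zip xs (List.zip (xs.map (fun p => num_elec p.2)) (pvPrefixes (xs.map (fun p => num_elec p.2)) t))).foldl
      (fun result x =>
        let count := max 0 (min x.2.1 (z - x.2.2))
        if count > 0 then result ++ [(x.1.1, x.1.2, count)] else result) acc
      = acc ++ pvBGo xs (z - t) := by
  intro xs
  induction xs with
  | nil => intro t acc; simp [pvBGo, pvPrefixes]
  | cons p rest ih =>
    intro t acc
    obtain ⟨n, l⟩ := p
    simp only [List.map_cons, pvPrefixes, List.zip_cons_cons, List.foldl_cons]
    rw [ih (t + num_elec l)]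
    simp only [pvBGo]
    have : z - (t + num_elec l) = z - t - num_elec l := by ring
    rw [this]
    by_cases h : 0 < max 0 (min (num_elec l) (z - t))
    · simp [h, List.append_assoc]
    · simp [h]

theorem bgo_nonpos : ∀ (xs : List (Int × Int)) (r : Int),
    (∀ p ∈ xs, 0 ≤ p.2) → r ≤ 0 → pvBGo xs r = [] := by
  intro xs
  induction xs with
  | nil => intro r _ _; rfl
  | cons p rest ih =>
    intro r hpos hr
    obtain ⟨n, l⟩ := p
    have hl : 0 ≤ l := hpos (n, l) (by simp)
    have hcap : 0 < num_elec l := by unfold num_elec; omega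
    simp only [pvBGo]
    have hc : max 0 (min (num_elec l) r) = 0 := by omega
    rw [hc]
    simp only [lt_irrefl, if_false, List.nil_append]
    exact ih (r - num_elec l) (fun q hq => hpos q (by simp [hq])) (by omega)

theorem aloop_eq_bgo : ∀ (xs : List (Int × Int)) (r : Int),
    (∀ p ∈ xs, 0 ≤ p.2) → getOrbLoop r xs = pvBGo xs r := by
  intro xs
  induction xs with
  | nil => intro r _; rfl
  | cons p rest ih =>
    intro r hpos
    obtain ⟨n, l⟩ := p
    have hl : 0 ≤ l := hpos (n, l) (by simp)
    have hcap : 0 < num_elec l := by unfold num_elec; omega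
    have hrest : ∀ q ∈ rest, 0 ≤ q.2 := fun q hq => hpos q (by simp [hq])
    simp only [getOrbLoop, pvBGo]
    by_cases hr : r > 0
    · rw [if_pos hr]
      by_cases hge : r ≥ num_elec l
      · have hc : max 0 (min (num_elec l) r) = num_elec l := by omega
        rw [if_pos hge, hc, if_pos hcap]
        simp only [List.singleton_append, List.cons.injEq, true_and]
        exact ih (r - num_elec l) hrest
      · have hc : max 0 (min (num_elec l) r) = r := by omega
        rw [if_neg hge, hc, if_pos hr]
        simp only [List.singleton_append, List.cons.injEq, true_and]
        rw [ih (r - r) hrest, bgo_nonpos rest (r - r) hrest (by omega),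
            bgo_nonpos rest (r - num_elec l) hrest (by omega)]
    · rw [if_neg hr]
      have hc : max 0 (min (num_elec l) r) = 0 := by omega
      rw [hc]
      simp only [lt_irrefl, if_false, List.nil_append]
      exact (bgo_nonpos rest (r - num_elec l) hrest (by omega)).symm

-- ===== VERDICT (by name: the statement is the Claim_ definition above) =====
theorem get_orbitales_spec : Claim_equal_get_orbitales := by
  intro z _
  unfold Spec_get_orbitales get_orbitales get_orbitales_alt
  rw [foldl_eq_bgo z Sous_couche 0 []]
  simp only [List.nil_append, Int.sub_zero]
  exact aloop_eq_bgo Sous_couche z (by decide)
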